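-- pv_equiv track=rewrite | github.com/miliar/Code_Jam_Webscraper | solutions_python/solutions_year11_round3_nr2/83.py | calculate_q_star
-- ===== SOURCE A (Python) =====
-- def calculate_q_star(t, a):
--     """Calculate which star we will have just left when boosters go live.
--     If boosters go live WHILE we are at a star, that is q_star.
--     Also return hours into q_star when we go live (>= 0).
--     """
--     time_per_c_cycle = sum(a) * 2
--     num_full_c_cycles = t // time_per_c_cycle
--     result = num_full_c_cycles * len(a)
--     hours_in = 0
--     remaining_time = t % time_per_c_cycle
--     for dist in a:
--         if remaining_time < dist*2:
--             hours_in = remaining_time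
--             break
--         remaining_time -= dist*2
--         result += 1
--     return result, hours_in
-- ===== SOURCE B (Python) =====
-- def calculate_q_star(t, a):
--     """Prefix-table formulation: precompute cumulative doubled distances once,
--     find the first prefix exceeding the in-cycle time, recover hours arithmetically."""
--     cycle = 2 * sum(a)
--     base = (t // cycle) * len(a)
--     rem = t % cycle
--     prefix = [0]
--     for d in a:
--         prefix.append(prefix[-1] + 2 * d)
--     k = len(a)
--     for i, p in enumerate(prefix[1:]):
--         if rem < p:
--             k = i
--             break
--     hours = rem - prefix[k] if k < len(a) else 0
--     return base + k, hours
-- ===== Notes on version B (the rewrite author's own statement) =====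
-- stated objective: alternative
-- what changed: B precomputes a prefix-sum table of the doubled distances once and locates the answer as the first table entry exceeding the in-cycle time, recovering the hours arithmetically from the table, instead of A's destructive subtract-and-count loop over a running remainder.
import Mathlib
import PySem

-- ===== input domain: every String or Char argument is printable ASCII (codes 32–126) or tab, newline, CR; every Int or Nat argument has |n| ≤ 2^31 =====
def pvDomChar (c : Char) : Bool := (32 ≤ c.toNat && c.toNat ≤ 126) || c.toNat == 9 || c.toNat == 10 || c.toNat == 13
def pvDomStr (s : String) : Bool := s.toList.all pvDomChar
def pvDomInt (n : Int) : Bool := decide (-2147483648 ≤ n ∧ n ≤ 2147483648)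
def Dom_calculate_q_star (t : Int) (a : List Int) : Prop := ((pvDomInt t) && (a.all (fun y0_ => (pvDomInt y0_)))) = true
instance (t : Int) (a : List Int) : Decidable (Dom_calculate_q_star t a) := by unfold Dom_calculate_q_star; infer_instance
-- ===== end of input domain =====

-- B precomputes a prefix table of doubled distances and finds the first entry exceeding the
-- in-cycle time, instead of A's destructive subtract-and-count loop (alternative decomposition).

-- ===== PORT A =====
-- the for-loop with break, on state (result, remaining_time)
def pvALoop : List Int → Int → Int → Int × Int
  | [], result, _ => (result, 0)
  | d :: ds, result, rem =>
      if rem < d * 2 then (result, rem)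
      else pvALoop ds (result + 1) (rem - d * 2)

def calculate_q_star (t : Int) (a : List Int) : Int × Int :=
  let cycle := a.sum * 2
  let numFull := PySem.Int.floordiv t cycle
  let result := numFull * (a.length : Int)
  let rem := PySem.Int.mod t cycle
  pvALoop a result rem

-- ===== PORT B =====
-- the prefix-building loop: prefix.append(prefix[-1] + 2*d)
def pvPrefixLoop : List Int → List Int → List Int
  | [], p => p
  | d :: ds, p => pvPrefixLoop ds (p ++ [(p.getLast?.getD 0) + 2 * d])

-- the search loop: for i, p in enumerate(prefix[1:]): if rem < p: k = i; break
def pvFind : List Int → Int → Nat → Nat → Nat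
  | [], _, _, k0 => k0
  | p :: ps, rem, i, k0 => if rem < p then i else pvFind ps rem (i + 1) k0

def calculate_q_star_alt (t : Int) (a : List Int) : Int × Int :=
  let cycle := 2 * a.sum
  let base := (PySem.Int.floordiv t cycle) * (a.length : Int)
  let rem := PySem.Int.mod t cycle
  let P := pvPrefixLoop a [0]
  let k := pvFind (PySem.List.slice P (some 1) none) rem 0 a.length
  -- prefix[k] is read only when k < len(a), an in-range index, so getD is exact
  let hours := if k < a.length then rem - P.getD k 0 else 0
  (base + (k : Int), hours)

-- ===== PRECONDITION & SPEC =====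
-- Pre_ excludes only sum(a) = 0, where A raises ZeroDivisionError on t // (sum(a)*2).
def Pre_calculate_q_star (t : Int) (a : List Int) : Prop := a.sum ≠ 0
instance (t : Int) (a : List Int) : Decidable (Pre_calculate_q_star t a) := by
  unfold Pre_calculate_q_star; infer_instance

def pvWitness_calculate_q_star : Int × List Int := (5, [1, 2])

def Spec_calculate_q_star (t : Int) (a : List Int) (out : Int × Int) : Prop := out = calculate_q_star_alt t a
instance (t : Int) (a : List Int) (out : Int × Int) : Decidable (Spec_calculate_q_star t a out) := by unfold Spec_calculate_q_star; infer_instance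

-- ===== CLAIM (what is proved, stated in full; the proofs are below) =====
def Claim_equal_calculate_q_star : Prop := ∀ (t : Int) (a : List Int), Dom_calculate_q_star t a → Pre_calculate_q_star t a → Spec_calculate_q_star t a (calculate_q_star t a)

-- ===== LEMMAS AND PROOFS =====

-- canonical description of the scan: index of the first star not fully passed, and hours into it
def pvF : List Int → Int → Nat × Int
  | [], _ => (0, 0)
  | d :: ds, rem =>
      if rem < d * 2 then (0, rem)
      else ((pvF ds (rem - d * 2)).1 + 1, (pvF ds (rem - d * 2)).2)

-- cumulative doubled distances (tail of the prefix table)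
def pvCum : List Int → Int → List Int
  | [], _ => []
  | d :: ds, s => (s + 2 * d) :: pvCum ds (s + 2 * d)

theorem pvALoop_spec (a : List Int) : ∀ (res rem : Int),
    pvALoop a res rem = (res + ((pvF a rem).1 : Int), (pvF a rem).2) := by
  induction a with
  | nil => intro res rem; simp [pvALoop, pvF]
  | cons d ds ih =>
    intro res rem
    simp only [pvALoop, pvF]
    by_cases h : rem < d * 2
    · simp [h]
    · simp only [h, if_false]
      rw [ih (res + 1) (rem - d * 2)]
      refine Prod.ext ?_ rfl
      simp only
      push_cast
      ring

theorem pvF_fst_le (a : List Int) : ∀ rem, (pvF a rem).1 ≤ a.length := by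
  induction a with
  | nil => intro rem; simp [pvF]
  | cons d ds ih =>
    intro rem
    simp only [pvF, List.length_cons]
    split
    · omega
    · exact Nat.succ_le_succ (ih _)

theorem pvF_snd_zero (a : List Int) : ∀ rem, (pvF a rem).1 = a.length → (pvF a rem).2 = 0 := by
  induction a with
  | nil => intro rem _; simp [pvF]
  | cons d ds ih =>
    intro rem h
    simp only [pvF, List.length_cons] at h ⊢
    split at h
    · omega
    · rename_i hge
      simp only [hge, if_false]
      exact ih _ (by omega)

theorem pvPrefixLoop_spec (a : List Int) : ∀ (p : List Int) (s : Int),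
    pvPrefixLoop a (p ++ [s]) = p ++ s :: pvCum a s := by
  induction a with
  | nil => intro p s; simp [pvPrefixLoop, pvCum]
  | cons d ds ih =>
    intro p s
    have : (p ++ [s]).getLast?.getD 0 = s := by simp
    simp only [pvPrefixLoop, pvCum, this]
    have h2 : p ++ [s] ++ [s + 2 * d] = (p ++ [s]) ++ [s + 2 * d] := by simp
    rw [h2, ih (p ++ [s]) (s + 2 * d)]
    simp

theorem pvCum_length (a : List Int) : ∀ s, (pvCum a s).length = a.length := by
  induction a with
  | nil => intro s; simp [pvCum]
  | cons d ds ih => intro s; simp [pvCum, ih]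

theorem pvCum_shift (a : List Int) : ∀ s c, pvCum a (s + c) = (pvCum a s).map (· + c) := by
  induction a with
  | nil => intro s c; simp [pvCum]
  | cons d ds ih =>
    intro s c
    simp only [pvCum, List.map]
    have e : s + c + 2 * d = (s + 2 * d) + c := by ring
    rw [e, ih]

theorem getD_map_add (l : List Int) (c : Int) (j : Nat) (hj : j < l.length) :
    (l.map (· + c)).getD j 0 = l.getD j 0 + c := by
  rw [List.getD_eq_getElem _ _ (by simpa using hj), List.getD_eq_getElem _ _ hj, List.getElem_map]

theorem pvFind_map_add (l : List Int) : ∀ (c rem : Int) (i k0 : Nat),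
    pvFind (l.map (· + c)) rem i k0 = pvFind l (rem - c) i k0 := by
  induction l with
  | nil => intro c rem i k0; simp [pvFind]
  | cons p ps ih =>
    intro c rem i k0
    simp only [List.map, pvFind]
    by_cases h : rem - c < p
    · rw [if_pos (by omega), if_pos h]
    · rw [if_neg (by omega), if_neg h, ih]

theorem pvFind_spec (a : List Int) : ∀ (rem : Int) (i k0 : Nat),
    pvFind (pvCum a 0) rem i k0 =
      if (pvF a rem).1 < a.length then i + (pvF a rem).1 else k0 := by
  induction a with
  | nil => intro rem i k0; simp [pvCum, pvFind, pvF]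
  | cons d ds ih =>
    intro rem i k0
    simp only [pvCum, pvFind, pvF, List.length_cons]
    by_cases h : rem < d * 2
    · rw [if_pos (by omega)]
      simp [h]
    · rw [if_neg (by omega)]
      rw [pvCum_shift ds 0 (2 * d), pvFind_map_add, show rem - 2 * d = rem - d * 2 by ring, ih]
      simp only [h, if_false]
      have := pvF_fst_le ds (rem - d * 2)
      split_ifs <;> omega

theorem pvF_hours (a : List Int) : ∀ rem, (pvF a rem).1 < a.length →
    rem - (0 :: pvCum a 0).getD (pvF a rem).1 0 = (pvF a rem).2 := by
  induction a with
  | nil => intro rem h; simp at h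
  | cons d ds ih =>
    intro rem h
    have hcum : pvCum (d :: ds) 0 = (0 :: pvCum ds 0).map (· + 2 * d) := by
      simp only [pvCum, List.map]
      rw [show (2 * d : Int) = 0 + 2 * d by ring, pvCum_shift]
    simp only [pvF] at h ⊢
    by_cases hb : rem < d * 2
    · simp [hb]
    · simp only [hb, if_false] at h ⊢
      simp only [List.getD_cons_succ, hcum]
      have hlt : (pvF ds (rem - d * 2)).1 < (0 :: pvCum ds 0).length := by
        simp only [List.length_cons] at h ⊢
        rw [pvCum_length]
        omega
      rw [getD_map_add _ _ _ hlt]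
      have := ih (rem - d * 2) (by simp only [List.length_cons] at h; omega)
      omega

-- ===== VERDICT (by name: the statement is the Claim_ definition above) =====
theorem calculate_q_star_spec : Claim_equal_calculate_q_star := by
  intro t a _hdom _hpre
  unfold Spec_calculate_q_star calculate_q_star calculate_q_star_alt
  simp only [show (2 : Int) * a.sum = a.sum * 2 from by ring]
  set rem := PySem.Int.mod t (a.sum * 2) with hrem
  have hP : pvPrefixLoop a [0] = 0 :: pvCum a 0 := by
    simpa using pvPrefixLoop_spec a [] 0
  have htail : PySem.List.slice (pvPrefixLoop a [0]) (some 1) none = pvCum a 0 := by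
    rw [PySem.List.slice_from_one, hP]
    rfl
  have hle := pvF_fst_le a rem
  have hk : pvFind (PySem.List.slice (pvPrefixLoop a [0]) (some 1) none) rem 0 a.length
      = (pvF a rem).1 := by
    rw [htail, pvFind_spec]
    split_ifs <;> omega
  rw [pvALoop_spec, hk]
  by_cases h : (pvF a rem).1 < a.length
  · rw [if_pos h, hP, pvF_hours a rem h]
  · rw [if_neg h, pvF_snd_zero a rem (by omega)]
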